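-- pv_equiv track=rewrite | github.com/meiqw/chinese-word-segmentation-tagger | hw2.py | tag2seg
-- ===== SOURCE A (Python) =====
-- def tag2seg(char_seq, tag_seq):
--     """Given a raw sentence and a position tag sequence, generate the segmented word sequence"""
--     assert len(char_seq) == len(tag_seq)
--     segmented_sent = ''
--     for i in range(len(char_seq)):
--         if i != 0 and (tag_seq[i] == 'B' or tag_seq[i] == 'S'):
--             segmented_sent = segmented_sent + " "
--         segmented_sent = segmented_sent + char_seq[i]
--     return segmented_sent
-- ===== SOURCE B (Python) =====
-- def tag2seg(char_seq, tag_seq):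
--     """Given a raw sentence and a position tag sequence, generate the segmented word sequence"""
--     assert len(char_seq) == len(tag_seq)
--     words = []
--     for char, tag in zip(char_seq, tag_seq):
--         if not words or tag == 'B' or tag == 'S':
--             words.append([char])
--         else:
--             words[-1].append(char)
--     return ' '.join(map(''.join, words))
-- ===== Notes on version B (the rewrite author's own statement) =====
-- stated objective: idiomatic
-- what changed: B partitions the char/tag pairs into a list of words (each a list of chars; new word on empty list or tag 'B'/'S', otherwise appended to the last word) and produces the result with ' '.join(map(''.join, words)), instead of A's index loop appending chars and interior spaces into one growing string.
import Mathlib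
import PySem

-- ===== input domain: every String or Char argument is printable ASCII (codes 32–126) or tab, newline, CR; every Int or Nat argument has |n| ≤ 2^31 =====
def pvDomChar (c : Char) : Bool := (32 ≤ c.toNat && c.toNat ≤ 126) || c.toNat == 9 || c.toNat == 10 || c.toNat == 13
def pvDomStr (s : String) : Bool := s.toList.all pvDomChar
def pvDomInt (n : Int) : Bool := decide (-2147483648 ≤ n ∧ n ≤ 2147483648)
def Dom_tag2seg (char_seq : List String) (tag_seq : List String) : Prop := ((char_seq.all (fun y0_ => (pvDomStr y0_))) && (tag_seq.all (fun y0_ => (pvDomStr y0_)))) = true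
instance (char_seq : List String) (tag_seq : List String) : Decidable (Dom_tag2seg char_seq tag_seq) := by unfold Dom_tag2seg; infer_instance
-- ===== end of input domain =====

-- B builds the list of word strings (new word when the list is empty or the tag is 'B'/'S',
-- else extend the last word) and joins them with ' ', instead of A's index loop growing one string.


-- ===== PORT A =====
-- for i in range(len(char_seq)): optional " " then char; indexing is in range under Pre_,
-- so getD's default is never taken
def tag2seg (char_seq : List String) (tag_seq : List String) : String :=
  (List.range char_seq.length).foldl
    (fun seg i =>
      (if i ≠ 0 ∧ (tag_seq.getD i "" = "B" ∨ tag_seq.getD i "" = "S")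
        then seg ++ " " else seg) ++ char_seq.getD i "")
    ""

-- ===== PORT B =====
-- words are kept most-recent-first (Lean's natural fold accumulator) and reversed before the join;
-- the match's [] case is Python's 'not words' test; each word is a list of its chars' strings,
-- flattened by ''.join as in B
def tag2seg_alt (char_seq : List String) (tag_seq : List String) : String :=
  let words := (char_seq.zip tag_seq).foldl
    (fun ws ct =>
      match ws with
      | [] => [[ct.1]]
      | w :: rest =>
        if ct.2 = "B" ∨ ct.2 = "S" then [ct.1] :: w :: rest else (w ++ [ct.1]) :: rest)
    []
  PySem.Str.join " " (words.reverse.map (PySem.Str.join ""))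

-- ===== PRECONDITION & SPEC =====
-- Pre_ excludes exactly the inputs where A's (and B's) assert fails (AssertionError)
def Pre_tag2seg (char_seq : List String) (tag_seq : List String) : Prop :=
  char_seq.length = tag_seq.length
instance (char_seq : List String) (tag_seq : List String) : Decidable (Pre_tag2seg char_seq tag_seq) := by unfold Pre_tag2seg; infer_instance

def pvWitness_tag2seg : List String × List String :=
  (["a", "b", "c", "d"], ["B", "E", "S", "S"])

def Spec_tag2seg (char_seq : List String) (tag_seq : List String) (out : String) : Prop := out = tag2seg_alt char_seq tag_seq
instance (char_seq : List String) (tag_seq : List String) (out : String) : Decidable (Spec_tag2seg char_seq tag_seq out) := by unfold Spec_tag2seg; infer_instance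

-- ===== CLAIM (what is proved, stated in full; the proofs are below) =====
def Claim_equal_tag2seg : Prop := ∀ (char_seq : List String) (tag_seq : List String), Dom_tag2seg char_seq tag_seq → Pre_tag2seg char_seq tag_seq → Spec_tag2seg char_seq tag_seq (tag2seg char_seq tag_seq)

-- ===== LEMMAS AND PROOFS =====

-- Chars-level: joining with the last word extended by y appends y to the joined string
theorem chars_join_concat (sep : List Char) (l : List (List Char)) (x : List Char) :
    PySem.Chars.join sep (l ++ [x]) =
      match l with
      | [] => x
      | _ :: _ => PySem.Chars.join sep l ++ sep ++ x := by
  induction l generalizing x with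
  | nil => simp [PySem.Chars.join_singleton]
  | cons a l ih =>
    cases l with
    | nil => simp [PySem.Chars.join_cons_cons, PySem.Chars.join_singleton]
    | cons b r =>
      have ihb := ih x
      simp only [List.cons_append, PySem.Chars.join_cons_cons] at ihb ⊢
      rw [ihb]
      simp [List.append_assoc]

-- String-level corollaries about ' '.join
theorem join_singleton_str (x : String) : PySem.Str.join " " [x] = x := by
  apply String.toList_inj.mp
  simp [PySem.Str.toList_join, PySem.Chars.join_singleton]

theorem join_nil_str : PySem.Str.join " " ([] : List String) = "" := by
  apply String.toList_inj.mp
  simp [PySem.Str.toList_join, PySem.Chars.join_nil]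

theorem join_concat_ne (l : List String) (x : String) (h : l ≠ []) :
    PySem.Str.join " " (l ++ [x]) = PySem.Str.join " " l ++ " " ++ x := by
  apply String.toList_inj.mp
  simp only [PySem.Str.toList_join, List.map_append, List.map_cons, List.map_nil,
    String.toList_append, chars_join_concat]
  cases l with
  | nil => exact absurd rfl h
  | cons a l => simp

theorem join_concat_extend (l : List String) (x y : String) :
    PySem.Str.join " " (l ++ [x ++ y]) = PySem.Str.join " " (l ++ [x]) ++ y := by
  apply String.toList_inj.mp
  simp only [PySem.Str.toList_join, List.map_append, List.map_cons, List.map_nil,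
    String.toList_append, chars_join_concat]
  cases l with
  | nil => simp
  | cons a l => simp [List.append_assoc]

-- ''.join of a word extended by one char string, and of a single char string
theorem join_empty_concat (w : List String) (c : String) :
    PySem.Str.join "" (w ++ [c]) = PySem.Str.join "" w ++ c := by
  apply String.toList_inj.mp
  simp only [PySem.Str.toList_join, List.map_append, List.map_cons, List.map_nil,
    String.toList_append, chars_join_concat]
  cases w with
  | nil => simp [PySem.Chars.join_nil]
  | cons a l => simp

theorem join_empty_singleton (c : String) : PySem.Str.join "" [c] = c := by
  apply String.toList_inj.mp
  simp [PySem.Str.toList_join, PySem.Chars.join_singleton]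

-- joining after starting a new word / extending the last word
theorem join_rev_new (w : List String) (rest : List (List String)) (c : String) :
    PySem.Str.join " " (([c] :: w :: rest).reverse.map (PySem.Str.join "")) =
      PySem.Str.join " " ((w :: rest).reverse.map (PySem.Str.join "")) ++ " " ++ c := by
  have h : ([c] :: w :: rest).reverse.map (PySem.Str.join "") =
      (w :: rest).reverse.map (PySem.Str.join "") ++ [PySem.Str.join "" [c]] := by simp
  rw [h, join_empty_singleton, join_concat_ne _ _ (by simp)]

theorem join_rev_ext (w : List String) (rest : List (List String)) (c : String) :
    PySem.Str.join " " (((w ++ [c]) :: rest).reverse.map (PySem.Str.join "")) =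
      PySem.Str.join " " ((w :: rest).reverse.map (PySem.Str.join "")) ++ c := by
  have h1 : ((w ++ [c]) :: rest).reverse.map (PySem.Str.join "") =
      rest.reverse.map (PySem.Str.join "") ++ [PySem.Str.join "" w ++ c] := by
    simp [join_empty_concat]
  have h2 : (w :: rest).reverse.map (PySem.Str.join "") =
      rest.reverse.map (PySem.Str.join "") ++ [PySem.Str.join "" w] := by simp
  rw [h1, h2, join_concat_extend]

-- the main invariant, over the list of (char, tag) pairs, by reverse induction
theorem tag2seg_main (ps : List (String × String)) :
    (List.range (ps.map Prod.fst).length).foldl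
      (fun seg i =>
        (if i ≠ 0 ∧ ((ps.map Prod.snd).getD i "" = "B" ∨ (ps.map Prod.snd).getD i "" = "S")
          then seg ++ " " else seg) ++ (ps.map Prod.fst).getD i "")
      ""
    = PySem.Str.join " "
        ((ps.foldl
          (fun ws ct =>
            match ws with
            | [] => [[ct.1]]
            | w :: rest =>
              if ct.2 = "B" ∨ ct.2 = "S" then [ct.1] :: w :: rest else (w ++ [ct.1]) :: rest)
          []).reverse.map (PySem.Str.join ""))
    ∧ ((ps.foldl
          (fun ws ct =>
            match ws with
            | [] => [[ct.1]]
            | w :: rest =>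
              if ct.2 = "B" ∨ ct.2 = "S" then [ct.1] :: w :: rest else (w ++ [ct.1]) :: rest)
          []) = [] ↔ ps = []) := by
  induction ps using List.reverseRecOn with
  | nil => exact ⟨by decide, by simp⟩
  | append_singleton ps p ih =>
    obtain ⟨ih1, ih2⟩ := ih
    obtain ⟨c, t⟩ := p
    have hfst : (ps ++ [(c, t)]).map Prod.fst = ps.map Prod.fst ++ [c] := by simp
    have hsnd : (ps ++ [(c, t)]).map Prod.snd = ps.map Prod.snd ++ [t] := by simp
    have hlen : (ps.map Prod.fst ++ [c]).length = ps.length + 1 := by simp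
    have hlf : (ps.map Prod.fst).length = ps.length := by simp
    have hls : (ps.map Prod.snd).length = ps.length := by simp
    constructor
    · rw [hfst, hsnd, hlen, List.range_succ, List.foldl_append, List.foldl_append]
      -- the first ps.length steps only touch the old prefixes
      rw [PySem.List.foldl_congr_mem (List.range ps.length) _
        (fun seg i =>
          (if i ≠ 0 ∧ ((ps.map Prod.snd).getD i "" = "B" ∨ (ps.map Prod.snd).getD i "" = "S")
            then seg ++ " " else seg) ++ (ps.map Prod.fst).getD i "") ""
        (by
          intro acc i hi
          have hi' : i < ps.length := List.mem_range.mp hi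
          rw [List.getD_append _ _ _ _ (by omega), List.getD_append _ _ _ _ (by omega)])]
      rw [← hlf, ih1, hlf]
      -- the last step reads index ps.length, i.e. c and t
      simp only [List.foldl_cons, List.foldl_nil]
      rw [List.getD_append_right _ _ _ _ (by omega), List.getD_append_right _ _ _ _ (by omega)]
      rw [hlf, hls]
      simp only [Nat.sub_self, List.getD_cons_zero]
      -- case on the accumulated word list
      cases hws : ps.foldl
          (fun ws ct =>
            match ws with
            | [] => [[ct.1]]
            | w :: rest =>
              if ct.2 = "B" ∨ ct.2 = "S" then [ct.1] :: w :: rest else (w ++ [ct.1]) :: rest)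
          [] with
      | nil =>
        have hpsnil : ps = [] := ih2.mp hws
        subst hpsnil
        simp [join_nil_str, join_singleton_str, join_empty_singleton]
      | cons w rest =>
        have hn0 : ps.length ≠ 0 := by
          intro h
          have hnil : ps = [] := List.eq_nil_of_length_eq_zero h
          rw [hnil] at hws
          simp at hws
        by_cases ht : t = "B" ∨ t = "S"
        · rw [if_pos ⟨hn0, ht⟩]
          dsimp only
          rw [if_pos ht, join_rev_new]
        · rw [if_neg (fun hc => ht hc.2)]
          dsimp only
          rw [if_neg ht, join_rev_ext]
    · simp only [List.foldl_append, List.foldl_cons, List.foldl_nil]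
      constructor
      · intro h
        cases hws : ps.foldl
            (fun ws ct =>
              match ws with
              | [] => [[ct.1]]
              | w :: rest =>
                if ct.2 = "B" ∨ ct.2 = "S" then [ct.1] :: w :: rest else (w ++ [ct.1]) :: rest)
            [] with
        | nil => rw [hws] at h; simp at h
        | cons w rest => rw [hws] at h; dsimp at h; split at h <;> simp_all
      · intro h; simp at h

-- ===== VERDICT (by name: the statement is the Claim_ definition above) =====
theorem tag2seg_spec : Claim_equal_tag2seg := by
  intro char_seq tag_seq _ hpre
  unfold Spec_tag2seg tag2seg tag2seg_alt
  have h1 : (char_seq.zip tag_seq).map Prod.fst = char_seq :=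
    List.map_fst_zip (le_of_eq hpre)
  have h2 : (char_seq.zip tag_seq).map Prod.snd = tag_seq :=
    List.map_snd_zip (ge_of_eq hpre)
  have := tag2seg_main (char_seq.zip tag_seq)
  rw [h1, h2] at this
  exact this.1
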